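-- pv_equiv track=rewrite | github.com/treeie2/app_stockapril | process_wechat_articles.py | parse_article_block
-- ===== SOURCE A (Python) =====
-- def parse_article_block(block):
--     """解析单个文章块"""
--     lines = block.strip().split('\n')
--
--     article = {
--         'source': '',
--         'fetched_at': '',
--         'title': '',
--         'date': '',
--         'content': ''
--     }
--
--     content_start = False
--     content_lines = []
--
--     for line in lines:
--         if not content_start:
--             if line.startswith('source:'):
--                 article['source'] = line.replace('source:', '').strip()
--             elif line.startswith('fetched_at:'):
--                 article['fetched_at'] = line.replace('fetched_at:', '').strip()
--             elif line.startswith('title:'):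
--                 article['title'] = line.replace('title:', '').strip()
--             elif line.startswith('date:'):
--                 article['date'] = line.replace('date:', '').strip()
--             else:
--                 content_start = True
--                 content_lines.append(line)
--         else:
--             content_lines.append(line)
--
--     article['content'] = '\n'.join(content_lines)
--     return article
-- ===== SOURCE B (Python) =====
-- def parse_article_block(block):
--     """Two-phase parse: locate the header/body boundary first, then assign
--     fields from the header slice and take content as one join of the tail slice."""
--     lines = block.strip().split('\n')
--     prefixes = [('source:', 'source'), ('fetched_at:', 'fetched_at'),
--                 ('title:', 'title'), ('date:', 'date')]
--     boundary = len(lines)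
--     for i, line in enumerate(lines):
--         if not any(line.startswith(p) for p, _ in prefixes):
--             boundary = i
--             break
--     article = {'source': '', 'fetched_at': '', 'title': '', 'date': '', 'content': ''}
--     for line in lines[:boundary]:
--         for prefix, key in prefixes:
--             if line.startswith(prefix):
--                 article[key] = line.replace(prefix, '').strip()
--                 break
--     article['content'] = '\n'.join(lines[boundary:])
--     return article
-- ===== Notes on version B (the rewrite author's own statement) =====
-- stated objective: alternative
-- what changed: B first locates the header/body boundary (index of the first line matching no known prefix), then assigns fields from the header slice via a prefix-to-key table and builds content as one join of the tail slice, instead of A's single pass with a content_start flag and per-line appends.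
import Mathlib
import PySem

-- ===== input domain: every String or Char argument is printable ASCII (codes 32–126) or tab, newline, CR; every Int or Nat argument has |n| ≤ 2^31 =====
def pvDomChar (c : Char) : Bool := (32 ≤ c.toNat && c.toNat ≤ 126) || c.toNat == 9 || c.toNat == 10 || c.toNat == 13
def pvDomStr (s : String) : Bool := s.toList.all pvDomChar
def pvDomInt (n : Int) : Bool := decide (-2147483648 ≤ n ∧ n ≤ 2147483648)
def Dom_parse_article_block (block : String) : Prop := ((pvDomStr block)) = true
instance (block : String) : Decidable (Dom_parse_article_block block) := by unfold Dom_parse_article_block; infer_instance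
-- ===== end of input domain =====

-- B replaces A's flag-gated single pass by computing the header/body boundary first,
-- then assigning fields from the header slice and joining the tail slice (objective: alternative decomposition).

-- shared by both Pythons: line.replace(prefix, '').strip()
def pabVal (line pre : String) : String := PySem.Str.strip (PySem.Str.replace line pre "")

-- ===== PORT A =====
-- A's loop body: state = (article, content_start, content_lines)
def pabStepA (st : PySem.Dict String String × Bool × List String) (line : String) :
    PySem.Dict String String × Bool × List String :=
  if !st.2.1 then
    if PySem.Str.startswith line "source:" then (st.1.insert "source" (pabVal line "source:"), st.2.1, st.2.2)
    else if PySem.Str.startswith line "fetched_at:" then (st.1.insert "fetched_at" (pabVal line "fetched_at:"), st.2.1, st.2.2)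
    else if PySem.Str.startswith line "title:" then (st.1.insert "title" (pabVal line "title:"), st.2.1, st.2.2)
    else if PySem.Str.startswith line "date:" then (st.1.insert "date" (pabVal line "date:"), st.2.1, st.2.2)
    else (st.1, true, st.2.2 ++ [line])
  else (st.1, st.2.1, st.2.2 ++ [line])

def parse_article_block (block : String) : List (String × String) :=
  -- "\n" is nonempty, so Str.split? is always some; getD [] is exact
  let lines := (PySem.Str.split? (PySem.Str.strip block) "\n").getD []
  let article0 : PySem.Dict String String :=
    PySem.Dict.ofList [("source", ""), ("fetched_at", ""), ("title", ""), ("date", ""), ("content", "")]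
  let st := lines.foldl pabStepA (article0, false, [])
  (st.1.insert "content" (PySem.Str.join "\n" st.2.2)).items

-- ===== PORT B =====
def pabPrefixes : List (String × String) :=
  [("source:", "source"), ("fetched_at:", "fetched_at"), ("title:", "title"), ("date:", "date")]

def pabIsHeader (line : String) : Bool := pabPrefixes.any (fun p => PySem.Str.startswith line p.1)

-- index of the first non-header line; len(lines) if every line is a header
def pabBoundary : List String → Nat
  | [] => 0
  | l :: ls => if pabIsHeader l then pabBoundary ls + 1 else 0

-- B's inner for…break: the first matching prefix assigns its field
def pabAssign (article : PySem.Dict String String) (line : String) : PySem.Dict String String :=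
  match pabPrefixes.find? (fun p => PySem.Str.startswith line p.1) with
  | some pk => article.insert pk.2 (pabVal line pk.1)
  | none => article

def parse_article_block_alt (block : String) : List (String × String) :=
  -- "\n" is nonempty, so Str.split? is always some; getD [] is exact
  let lines := (PySem.Str.split? (PySem.Str.strip block) "\n").getD []
  let b := pabBoundary lines
  let article := (lines.take b).foldl pabAssign
    (PySem.Dict.ofList [("source", ""), ("fetched_at", ""), ("title", ""), ("date", ""), ("content", "")])
  (article.insert "content" (PySem.Str.join "\n" (lines.drop b))).items

-- ===== PRECONDITION & SPEC =====
def Spec_parse_article_block (block : String) (out : List (String × String)) : Prop := out = parse_article_block_alt block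
instance (block : String) (out : List (String × String)) : Decidable (Spec_parse_article_block block out) := by unfold Spec_parse_article_block; infer_instance

-- ===== CLAIM (what is proved, stated in full; the proofs are below) =====
def Claim_equal_parse_article_block : Prop := ∀ (block : String), Dom_parse_article_block block → Spec_parse_article_block block (parse_article_block block)

-- ===== LEMMAS AND PROOFS =====

-- once the flag is set, A only appends
lemma pab_flag_absorb (lines : List String) (a : PySem.Dict String String) (cl : List String) :
    lines.foldl pabStepA (a, true, cl) = (a, true, cl ++ lines) := by
  induction lines generalizing cl with
  | nil => simp
  | cons l ls ih => simp [pabStepA, ih]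

-- on a header line, A's elif chain is B's find?-assignment
lemma pab_step_header (a : PySem.Dict String String) (cl : List String) (l : String)
    (h : pabIsHeader l = true) : pabStepA (a, false, cl) l = (pabAssign a l, false, cl) := by
  by_cases h1 : PySem.Str.startswith l "source:" <;>
  by_cases h2 : PySem.Str.startswith l "fetched_at:" <;>
  by_cases h3 : PySem.Str.startswith l "title:" <;>
  by_cases h4 : PySem.Str.startswith l "date:" <;>
  simp_all [pabStepA, pabAssign, pabIsHeader, pabPrefixes, List.find?]

-- on a non-header line, A sets the flag and starts the content list
lemma pab_step_body (a : PySem.Dict String String) (cl : List String) (l : String)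
    (h : pabIsHeader l = false) : pabStepA (a, false, cl) l = (a, true, cl ++ [l]) := by
  by_cases h1 : PySem.Str.startswith l "source:" <;>
  by_cases h2 : PySem.Str.startswith l "fetched_at:" <;>
  by_cases h3 : PySem.Str.startswith l "title:" <;>
  by_cases h4 : PySem.Str.startswith l "date:" <;>
  simp_all [pabStepA, pabIsHeader, pabPrefixes]

-- A's fold over the whole list is B's boundary decomposition
lemma pab_fold_eq (lines : List String) (a : PySem.Dict String String) :
    lines.foldl pabStepA (a, false, []) =
      ((lines.take (pabBoundary lines)).foldl pabAssign a,
        decide (pabBoundary lines < lines.length),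
        lines.drop (pabBoundary lines)) := by
  induction lines generalizing a with
  | nil => simp [pabBoundary]
  | cons l ls ih =>
    by_cases h : pabIsHeader l = true
    · rw [List.foldl_cons, pab_step_header a [] l h, ih (pabAssign a l)]
      simp [pabBoundary, h]
    · have h' : pabIsHeader l = false := by simpa using h
      rw [List.foldl_cons, pab_step_body a [] l h', pab_flag_absorb]
      simp [pabBoundary, h']

-- ===== VERDICT (by name: the statement is the Claim_ definition above) =====
theorem parse_article_block_spec : Claim_equal_parse_article_block := by
  intro block _
  unfold Spec_parse_article_block parse_article_block parse_article_block_alt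
  simp only [pab_fold_eq]
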